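-- pv_equiv track=rewrite | github.com/kkommatt/StaticModellingInAI | Lab3/task4.py | prisoner_algorithm_choice
-- ===== SOURCE A (Python) =====
-- def prisoner_algorithm_choice(boxes, num_prisoners, max_attempts):
--     success_count = 0
--     for prisoner in range(1, num_prisoners + 1):
--         current_box = prisoner
--         for attempt in range(max_attempts):
--             if boxes[current_box - 1] == prisoner:
--                 success_count += 1
--                 break
--             current_box = boxes[current_box - 1]
--     return success_count
-- ===== SOURCE B (Python) =====
-- def prisoner_algorithm_choice(boxes, num_prisoners, max_attempts):
--     if num_prisoners <= 0 or max_attempts <= 0: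
--         return 0
--     n = len(boxes)
--     cycle_len = {}
--     for start in range(1, n + 1):
--         if start in cycle_len:
--             continue
--         cycle = [start]
--         cur = boxes[start - 1]
--         while cur != start:
--             cycle.append(cur)
--             cur = boxes[cur - 1]
--         for member in cycle:
--             cycle_len[member] = len(cycle)
--     return sum(1 for i in range(1, num_prisoners + 1) if cycle_len[i] <= max_attempts)
-- ===== Notes on version B (the rewrite author's own statement) =====
-- stated objective: faster
-- what changed: Instead of re-walking up to max_attempts boxes for every prisoner, B short-circuits the trivial cases and decomposes the permutation into cycles once (each box visited once, lengths memoised in a dict), then counts prisoners whose cycle length is at most max_attempts.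
-- outside the precondition, e.g. on prisoner_algorithm_choice([2, 1, 1], 3, 5): A returns 2, B does not finish within the time limit; on prisoner_algorithm_choice([0, 2], 2, 3): A returns 1, B does not finish within the time limit
import Mathlib
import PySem

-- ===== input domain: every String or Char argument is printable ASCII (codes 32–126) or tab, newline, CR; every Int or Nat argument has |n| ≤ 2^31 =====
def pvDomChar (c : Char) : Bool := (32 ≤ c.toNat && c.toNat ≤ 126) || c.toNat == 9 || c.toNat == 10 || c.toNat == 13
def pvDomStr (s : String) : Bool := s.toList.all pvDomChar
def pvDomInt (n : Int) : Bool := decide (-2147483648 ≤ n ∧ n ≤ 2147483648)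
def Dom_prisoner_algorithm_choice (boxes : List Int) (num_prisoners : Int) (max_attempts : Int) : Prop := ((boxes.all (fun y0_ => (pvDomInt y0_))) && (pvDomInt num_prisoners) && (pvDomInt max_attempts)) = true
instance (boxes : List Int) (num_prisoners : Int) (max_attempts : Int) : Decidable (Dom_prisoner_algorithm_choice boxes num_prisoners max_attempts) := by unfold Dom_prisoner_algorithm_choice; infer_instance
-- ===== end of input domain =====

-- B replaces A's per-prisoner bounded walk by a single cycle decomposition of the
-- permutation (each box visited once, cycle lengths memoised in a dict), then counts
-- the prisoners whose cycle length is at most max_attempts.  Objective: faster.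

-- ===== PORT A =====
-- inner 'for attempt in range(max_attempts): ... break' loop of A, as fuel recursion
def pvLoopA (boxes : List Int) (prisoner : Int) : Nat → Int → Bool
  | 0, _ => false
  | fuel + 1, current =>
    if (PySem.List.pyGet? boxes (current - 1)).getD 0 = prisoner then true
    else pvLoopA boxes prisoner fuel ((PySem.List.pyGet? boxes (current - 1)).getD 0)

def prisoner_algorithm_choice (boxes : List Int) (num_prisoners : Int) (max_attempts : Int) : Int :=
  (PySem.List.pyRange 1 (num_prisoners + 1) 1).foldl
    (fun acc prisoner => if pvLoopA boxes prisoner max_attempts.toNat prisoner then acc + 1 else acc) 0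

-- ===== PORT B =====
-- 'while cur != start: cycle.append(cur); cur = boxes[cur - 1]' of B; the fuel
-- boxes.length only makes the loop total (under Pre_ the walk reaches start first)
def pvWalkB (boxes : List Int) (start : Int) : Nat → Int → List Int → List Int
  | 0, _, acc => acc
  | fuel + 1, cur, acc =>
    if cur = start then acc
    else pvWalkB boxes start fuel ((PySem.List.pyGet? boxes (cur - 1)).getD 0) (acc ++ [cur])

def pvCycleOf (boxes : List Int) (start : Int) : List Int :=
  pvWalkB boxes start boxes.length ((PySem.List.pyGet? boxes (start - 1)).getD 0) [start]

def pvBuildDict (boxes : List Int) : PySem.Dict Int Int :=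
  (PySem.List.pyRange 1 ((boxes.length : Int) + 1) 1).foldl
    (fun d start =>
      if d.contains start then d
      else
        let cyc := pvCycleOf boxes start
        cyc.foldl (fun d m => d.insert m (cyc.length : Int)) d)
    PySem.Dict.empty

def prisoner_algorithm_choice_alt (boxes : List Int) (num_prisoners : Int) (max_attempts : Int) : Int :=
  if num_prisoners ≤ 0 ∨ max_attempts ≤ 0 then 0
  else
  let d := pvBuildDict boxes
  (PySem.List.pyRange 1 (num_prisoners + 1) 1).foldl
    (fun acc i => acc + (if d.getD i 0 ≤ max_attempts then 1 else 0)) 0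

-- ===== PRECONDITION & SPEC =====
-- Pre_ admits the trivial inputs (no prisoner or no attempt: A touches no box) and
-- otherwise restricts to the task's natural domain: boxes is a permutation of
-- 1..len(boxes) and num_prisoners ≤ len(boxes).  Outside it A's box chain either
-- raises IndexError, silently uses Python's negative-index wraparound, or (when a
-- non-permutation value traps or cuts a chain) A returns a value on inputs where B's
-- cycle walk never terminates or raises KeyError; see cites.
def Pre_prisoner_algorithm_choice (boxes : List Int) (num_prisoners : Int) (max_attempts : Int) : Prop :=
  (num_prisoners ≤ 0 ∨ max_attempts ≤ 0) ∨
    ((∀ b ∈ boxes, 1 ≤ b ∧ b ≤ (boxes.length : Int)) ∧ boxes.Nodup ∧ num_prisoners ≤ (boxes.length : Int))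
instance (boxes : List Int) (num_prisoners : Int) (max_attempts : Int) : Decidable (Pre_prisoner_algorithm_choice boxes num_prisoners max_attempts) := by unfold Pre_prisoner_algorithm_choice; infer_instance

def pvWitness_prisoner_algorithm_choice : List Int × Int × Int := ([2, 3, 1, 4], 4, 2)

def Spec_prisoner_algorithm_choice (boxes : List Int) (num_prisoners : Int) (max_attempts : Int) (out : Int) : Prop := out = prisoner_algorithm_choice_alt boxes num_prisoners max_attempts
instance (boxes : List Int) (num_prisoners : Int) (max_attempts : Int) (out : Int) : Decidable (Spec_prisoner_algorithm_choice boxes num_prisoners max_attempts out) := by unfold Spec_prisoner_algorithm_choice; infer_instance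

-- ===== CLAIM (what is proved, stated in full; the proofs are below) =====
def Claim_equal_prisoner_algorithm_choice : Prop := ∀ (boxes : List Int) (num_prisoners : Int) (max_attempts : Int), Dom_prisoner_algorithm_choice boxes num_prisoners max_attempts → Pre_prisoner_algorithm_choice boxes num_prisoners max_attempts → Spec_prisoner_algorithm_choice boxes num_prisoners max_attempts (prisoner_algorithm_choice boxes num_prisoners max_attempts)

-- ===== LEMMAS AND PROOFS =====

def pvStep (boxes : List Int) (x : Int) : Int := (PySem.List.pyGet? boxes (x - 1)).getD 0
def pvIter (boxes : List Int) : Nat → Int → Int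
  | 0, x => x
  | k + 1, x => pvStep boxes (pvIter boxes k x)
def pvS (boxes : List Int) (x : Int) : Prop := 1 ≤ x ∧ x ≤ (boxes.length : Int)

theorem pvStep_eq_getElem {boxes : List Int} {x : Int} (hx : pvS boxes x) :
    pvStep boxes x = boxes[(x-1).toNat]'(by obtain ⟨h1,h2⟩ := hx; omega) := by
  obtain ⟨h1, h2⟩ := hx
  rw [pvStep, PySem.List.pyGet?_eq_some_getElem boxes (by omega) (by omega), Option.getD_some]

theorem pvStep_mem {boxes : List Int} (hP : ∀ b ∈ boxes, 1 ≤ b ∧ b ≤ (boxes.length : Int))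
    {x : Int} (hx : pvS boxes x) : pvS boxes (pvStep boxes x) := by
  rw [pvStep_eq_getElem hx]
  exact hP _ (List.getElem_mem _)

theorem pvStep_inj {boxes : List Int} (hP : ∀ b ∈ boxes, 1 ≤ b ∧ b ≤ (boxes.length : Int))
    (hnd : boxes.Nodup) {u v : Int} (hu : pvS boxes u) (hv : pvS boxes v)
    (h : pvStep boxes u = pvStep boxes v) : u = v := by
  rw [pvStep_eq_getElem hu, pvStep_eq_getElem hv] at h
  have := hnd.getElem_inj_iff.mp h
  obtain ⟨h1, h2⟩ := hu; obtain ⟨h3, h4⟩ := hv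
  omega

theorem pvIter_mem {boxes : List Int} (hP : ∀ b ∈ boxes, 1 ≤ b ∧ b ≤ (boxes.length : Int))
    {x : Int} (hx : pvS boxes x) (k : Nat) : pvS boxes (pvIter boxes k x) := by
  induction k with
  | zero => exact hx
  | succ k ih => exact pvStep_mem hP ih

theorem pvIter_add (boxes : List Int) (a b : Nat) (x : Int) :
    pvIter boxes (a + b) x = pvIter boxes a (pvIter boxes b x) := by
  induction a with
  | zero => simp [pvIter]
  | succ a ih => rw [show a + 1 + b = (a + b) + 1 from by omega]; simp [pvIter, ih]

theorem pvCancel {boxes : List Int} (hP : ∀ b ∈ boxes, 1 ≤ b ∧ b ≤ (boxes.length : Int))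
    (hnd : boxes.Nodup) {x : Int} (hx : pvS boxes x) :
    ∀ a d, pvIter boxes (a + d) x = pvIter boxes a x → pvIter boxes d x = x := by
  intro a
  induction a with
  | zero => intro d h; simpa [pvIter] using h
  | succ a ih =>
    intro d h
    rw [show a + 1 + d = (a + d) + 1 from by omega] at h
    exact ih d (pvStep_inj hP hnd (pvIter_mem hP hx _) (pvIter_mem hP hx _) h)

theorem pvMinPeriod {boxes : List Int} (hP : ∀ b ∈ boxes, 1 ≤ b ∧ b ≤ (boxes.length : Int))
    (hnd : boxes.Nodup) {x : Int} (hx : pvS boxes x) :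
    ∃ L : Nat, 0 < L ∧ L ≤ boxes.length ∧ pvIter boxes L x = x ∧
      ∀ j, 0 < j → j < L → pvIter boxes j x ≠ x := by
  have hpig : ∃ a ∈ Finset.range (boxes.length + 1), ∃ b ∈ Finset.range (boxes.length + 1),
      a ≠ b ∧ pvIter boxes a x = pvIter boxes b x := by
    have hcard : (Finset.Icc (1 : Int) (boxes.length : Int)).card = boxes.length := by
      rw [Int.card_Icc]; omega
    apply Finset.exists_ne_map_eq_of_card_lt_of_maps_to
      (t := Finset.Icc (1 : Int) (boxes.length : Int))
    · rw [hcard, Finset.card_range]; omega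
    · intro a _
      exact Finset.mem_Icc.mpr (pvIter_mem hP hx a)
  obtain ⟨a, ha, b, hb, hab, heq⟩ := hpig
  simp [Finset.mem_range] at ha hb
  -- wlog a < b
  have hex : ∃ k, 0 < k ∧ k ≤ boxes.length ∧ pvIter boxes k x = x := by
    rcases Nat.lt_or_ge a b with h | h
    · refine ⟨b - a, by omega, by omega, ?_⟩
      exact pvCancel hP hnd hx a (b - a) (by rw [show a + (b - a) = b from by omega]; exact heq.symm)
    · have hba : b < a := by omega
      refine ⟨a - b, by omega, by omega, ?_⟩
      exact pvCancel hP hnd hx b (a - b) (by rw [show b + (a - b) = a from by omega]; exact heq)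
  obtain ⟨k, hk1, hk2, hk3⟩ := hex
  have hex' : ∃ k, 0 < k ∧ pvIter boxes k x = x := ⟨k, hk1, hk3⟩
  refine ⟨Nat.find hex', (Nat.find_spec hex').1, ?_, (Nat.find_spec hex').2, ?_⟩
  · exact le_trans (Nat.find_min' hex' ⟨hk1, hk3⟩) hk2
  · intro j hj1 hj2 hfix
    exact Nat.find_min hex' hj2 ⟨hj1, hfix⟩

theorem pvLoopA_iff {boxes : List Int} (x : Int) :
    ∀ (fuel j : Nat), (pvLoopA boxes x fuel (pvIter boxes j x) = true ↔
      ∃ k, 0 < k ∧ k ≤ fuel ∧ pvIter boxes (j + k) x = x) := by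
  intro fuel
  induction fuel with
  | zero =>
    intro j
    simp only [pvLoopA, Bool.false_eq_true, false_iff]
    rintro ⟨k, h1, h2, _⟩; omega
  | succ fuel ih =>
    intro j
    have hstep : (PySem.List.pyGet? boxes (pvIter boxes j x - 1)).getD 0 = pvIter boxes (j + 1) x := rfl
    simp only [pvLoopA, hstep]
    by_cases hc : pvIter boxes (j + 1) x = x
    · rw [if_pos hc]
      constructor
      · intro _; exact ⟨1, by omega, by omega, by simpa using hc⟩
      · intro _; rfl
    · rw [if_neg hc, ih (j + 1)]
      constructor
      · rintro ⟨k, h1, h2, h3⟩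
        exact ⟨k + 1, by omega, by omega, by rwa [show j + (k + 1) = j + 1 + k from by omega]⟩
      · rintro ⟨k, h1, h2, h3⟩
        rcases k with _ | k
        · omega
        · rcases Nat.eq_zero_or_pos k with hk0 | hk0
          · subst hk0; exact absurd (by simpa using h3) hc
          · exact ⟨k, hk0, by omega, by rwa [show j + 1 + k = j + (k + 1) from by omega]⟩

theorem pvWalk_spec {boxes : List Int} {x : Int} {L : Nat} (hL : 0 < L)
    (hfix : pvIter boxes L x = x) (hmin : ∀ j, 0 < j → j < L → pvIter boxes j x ≠ x) :
    ∀ (fuel m : Nat) (acc : List Int), 0 < m → m ≤ L → L - m ≤ fuel →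
      pvWalkB boxes x fuel (pvIter boxes m x) acc =
        acc ++ (List.range (L - m)).map (fun j => pvIter boxes (m + j) x) := by
  intro fuel
  induction fuel with
  | zero =>
    intro m acc h1 h2 h3
    have hm : m = L := by omega
    subst hm
    simp [pvWalkB]
  | succ fuel ih =>
    intro m acc h1 h2 h3
    by_cases hm : m = L
    · subst hm
      simp [pvWalkB, hfix]
    · have hne : pvIter boxes m x ≠ x := hmin m h1 (by omega)
      have hstep : (PySem.List.pyGet? boxes (pvIter boxes m x - 1)).getD 0 = pvIter boxes (m + 1) x := rfl
      simp only [pvWalkB, if_neg hne, hstep]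
      rw [ih (m + 1) (acc ++ [pvIter boxes m x]) (by omega) (by omega) (by omega)]
      rw [show L - m = (L - (m + 1)) + 1 from by omega, List.range_succ_eq_map]
      simp only [List.map_cons, List.map_map, List.append_assoc, List.singleton_append,
        Nat.add_zero]
      congr 2
      apply List.map_congr_left
      intro j _
      simp only [Function.comp_apply]
      rw [show m + (j + 1) = m + 1 + j from by omega]

theorem pvCycleOf_eq {boxes : List Int} {x : Int} {L : Nat} (hL : 0 < L)
    (hLn : L ≤ boxes.length) (hfix : pvIter boxes L x = x)
    (hmin : ∀ j, 0 < j → j < L → pvIter boxes j x ≠ x) :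
    pvCycleOf boxes x = (List.range L).map (fun j => pvIter boxes j x) := by
  have hstep : (PySem.List.pyGet? boxes (x - 1)).getD 0 = pvIter boxes 1 x := rfl
  rw [pvCycleOf, hstep,
    pvWalk_spec hL hfix hmin boxes.length 1 [x] (by omega) (by omega) (by omega)]
  rw [show L = (L - 1) + 1 from by omega]
  simp only [Nat.add_sub_cancel, List.range_succ_eq_map, List.map_cons, List.map_map,
    List.singleton_append]
  congr 1
  apply List.map_congr_left
  intro j _
  simp only [Function.comp_apply]
  rw [show 1 + j = j + 1 from by omega]

theorem pvMinPeriod_orbit {boxes : List Int} {x y : Int} {L j : Nat}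
    (hfix : pvIter boxes L x = x) (hmin : ∀ m, 0 < m → m < L → pvIter boxes m x ≠ x)
    (hL : 0 < L) (hj : j ≤ L) (hy : y = pvIter boxes j x) :
    pvIter boxes L y = y ∧ ∀ m, 0 < m → m < L → pvIter boxes m y ≠ y := by
  have hfix' : pvIter boxes L y = y := by
    rw [hy, ← pvIter_add, show L + j = j + L from by omega, pvIter_add, hfix]
  refine ⟨hfix', ?_⟩
  intro m hm1 hm2 hfm
  have hxy : pvIter boxes (L - j) y = x := by
    rw [hy, ← pvIter_add, show L - j + j = L from by omega, hfix]
  have : pvIter boxes m x = x := by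
    rw [← hxy, ← pvIter_add, show m + (L - j) = (L - j) + m from by omega, pvIter_add, hfm]
  exact hmin m hm1 hm2 this

theorem pvInsertFold_get? (v : Int) : ∀ (ys : List Int) (d : PySem.Dict Int Int) (i : Int),
    (ys.foldl (fun d m => d.insert m v) d).get? i = if i ∈ ys then some v else d.get? i := by
  intro ys
  induction ys with
  | nil => intro d i; simp
  | cons y ys ih =>
    intro d i
    simp only [List.foldl_cons, ih, PySem.Dict.get?_insert, List.mem_cons]
    by_cases h1 : i ∈ ys <;> by_cases h2 : i = y <;> simp [h1, h2]

theorem pvCycleLen_mem {boxes : List Int} (hP : ∀ b ∈ boxes, 1 ≤ b ∧ b ≤ (boxes.length : Int))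
    (hnd : boxes.Nodup) {s0 : Int} (hs : pvS boxes s0) {i : Int} (hi : i ∈ pvCycleOf boxes s0) :
    (pvCycleOf boxes i).length = (pvCycleOf boxes s0).length := by
  obtain ⟨L, hL, hLn, hfix, hmin⟩ := pvMinPeriod hP hnd hs
  have hcyc := pvCycleOf_eq hL hLn hfix hmin
  have hlen : (pvCycleOf boxes s0).length = L := by rw [hcyc]; simp
  rw [hcyc] at hi
  simp only [List.mem_map, List.mem_range] at hi
  obtain ⟨j, hj, rfl⟩ := hi
  obtain ⟨hfix', hmin'⟩ := pvMinPeriod_orbit hfix hmin hL (le_of_lt hj) rfl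
  rw [pvCycleOf_eq hL hLn hfix' hmin', hlen]
  simp

theorem pvStart_mem_cycle {boxes : List Int} (hP : ∀ b ∈ boxes, 1 ≤ b ∧ b ≤ (boxes.length : Int))
    (hnd : boxes.Nodup) {s0 : Int} (hs : pvS boxes s0) : s0 ∈ pvCycleOf boxes s0 := by
  obtain ⟨L, hL, hLn, hfix, hmin⟩ := pvMinPeriod hP hnd hs
  rw [pvCycleOf_eq hL hLn hfix hmin]
  simp only [List.mem_map, List.mem_range]
  exact ⟨0, hL, rfl⟩

theorem pvBuildFold_spec {boxes : List Int} (hP : ∀ b ∈ boxes, 1 ≤ b ∧ b ≤ (boxes.length : Int))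
    (hnd : boxes.Nodup) :
    ∀ (l : List Int) (d : PySem.Dict Int Int),
      (∀ s ∈ l, pvS boxes s) →
      (∀ i v, d.get? i = some v → pvS boxes i ∧ v = ((pvCycleOf boxes i).length : Int)) →
      (∀ i v, (l.foldl (fun d start =>
          if d.contains start then d
          else
            let cyc := pvCycleOf boxes start
            cyc.foldl (fun d m => d.insert m (cyc.length : Int)) d) d).get? i = some v →
            pvS boxes i ∧ v = ((pvCycleOf boxes i).length : Int)) ∧
      (∀ s, ((d.get? s).isSome ∨ s ∈ l) → ((l.foldl (fun d start =>
          if d.contains start then d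
          else
            let cyc := pvCycleOf boxes start
            cyc.foldl (fun d m => d.insert m (cyc.length : Int)) d) d).get? s).isSome) := by
  intro l
  induction l with
  | nil =>
    intro d _ hinv
    refine ⟨hinv, ?_⟩
    intro s hs
    simpa using hs
  | cons s0 l ih =>
    intro d hS hinv
    have hs0 : pvS boxes s0 := hS s0 (by simp)
    simp only [List.foldl_cons]
    -- properties of one step
    by_cases hc : d.contains s0
    · simp only [if_pos hc]
      refine (ih d (fun s hs => hS s (by simp [hs])) hinv).imp id ?_
      intro hcov s hs
      apply hcov
      rcases hs with h | h
      · exact Or.inl h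
      · rcases List.mem_cons.mp h with rfl | h
        · left
          rw [PySem.Dict.contains_eq_isSome_get?] at hc
          exact hc
        · exact Or.inr h
    · simp only [if_neg hc]
      set d' := (pvCycleOf boxes s0).foldl
        (fun d m => d.insert m ((pvCycleOf boxes s0).length : Int)) d with hd'
      have hget : ∀ i, d'.get? i =
          if i ∈ pvCycleOf boxes s0 then some ((pvCycleOf boxes s0).length : Int)
          else d.get? i := fun i => pvInsertFold_get? _ _ _ _
      have hinv' : ∀ i v, d'.get? i = some v →
          pvS boxes i ∧ v = ((pvCycleOf boxes i).length : Int) := by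
        intro i v h
        rw [hget i] at h
        split at h
        · rename_i hmem
          obtain ⟨L, hL, hLn, hfix, hmin⟩ := pvMinPeriod hP hnd hs0
          have hcyc := pvCycleOf_eq hL hLn hfix hmin
          have hiS : pvS boxes i := by
            rw [hcyc] at hmem
            simp only [List.mem_map, List.mem_range] at hmem
            obtain ⟨j, _, rfl⟩ := hmem
            exact pvIter_mem hP hs0 j
          refine ⟨hiS, ?_⟩
          rw [pvCycleLen_mem hP hnd hs0 hmem]
          exact (Option.some_inj.mp h).symm
        · exact hinv i v h
      have hcov' : ∀ s, (d.get? s).isSome → (d'.get? s).isSome := by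
        intro s hs
        rw [hget s]
        split
        · rfl
        · exact hs
      refine (ih d' (fun s hs => hS s (by simp [hs])) hinv').imp id ?_
      intro hcov s hs
      apply hcov
      rcases hs with h | h
      · exact Or.inl (hcov' s h)
      · rcases List.mem_cons.mp h with rfl | h
        · left
          rw [hget s]
          rw [if_pos (pvStart_mem_cycle hP hnd hs0)]
          rfl
        · exact Or.inr h

theorem pvBuildDict_getD {boxes : List Int}
    (hP : ∀ b ∈ boxes, 1 ≤ b ∧ b ≤ (boxes.length : Int)) (hnd : boxes.Nodup)
    {i : Int} (hi : pvS boxes i) :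
    (pvBuildDict boxes).getD i 0 = ((pvCycleOf boxes i).length : Int) := by
  have hmem : ∀ s ∈ PySem.List.pyRange 1 ((boxes.length : Int) + 1) 1, pvS boxes s := by
    intro s hs
    rw [PySem.List.mem_pyRange_one] at hs
    exact ⟨hs.1, by omega⟩
  have hbase : ∀ i v, (PySem.Dict.empty : PySem.Dict Int Int).get? i = some v →
      pvS boxes i ∧ v = ((pvCycleOf boxes i).length : Int) := by
    intro i v h
    simp [PySem.Dict.get?_empty] at h
  obtain ⟨hinv, hcov⟩ := pvBuildFold_spec hP hnd
    (PySem.List.pyRange 1 ((boxes.length : Int) + 1) 1) PySem.Dict.empty hmem hbase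
  have hil : i ∈ PySem.List.pyRange 1 ((boxes.length : Int) + 1) 1 := by
    rw [PySem.List.mem_pyRange_one]
    exact ⟨hi.1, by have := hi.2; omega⟩
  have hsome := hcov i (Or.inr hil)
  rw [pvBuildDict]
  obtain ⟨v, hv⟩ := Option.isSome_iff_exists.mp hsome
  rw [PySem.Dict.getD_eq_get?_getD, hv, Option.getD_some]
  exact (hinv i v hv).2


-- with max_attempts ≤ 0 the inner loop of A never runs, so A counts nothing
theorem pvFoldA_zero (boxes : List Int) (num_prisoners : Int) (max_attempts : Int)
    (ht : max_attempts.toNat = 0) :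
    (PySem.List.pyRange 1 (num_prisoners + 1) 1).foldl
      (fun (acc : Int) prisoner => if pvLoopA boxes prisoner max_attempts.toNat prisoner then acc + 1 else acc) 0 = 0 := by
  rw [ht]
  generalize PySem.List.pyRange 1 (num_prisoners + 1) 1 = l
  induction l with
  | nil => rfl
  | cons p l ih => simpa [pvLoopA] using ih

-- ===== VERDICT (by name: the statement is the Claim_ definition above) =====
theorem prisoner_algorithm_choice_spec : Claim_equal_prisoner_algorithm_choice := by
  intro boxes num_prisoners max_attempts _hdom hpre
  by_cases htriv : num_prisoners ≤ 0 ∨ max_attempts ≤ 0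
  · simp only [Spec_prisoner_algorithm_choice, prisoner_algorithm_choice,
      prisoner_algorithm_choice_alt, if_pos htriv]
    rcases htriv with h | h
    · rw [PySem.List.pyRange_one_eq_nil (by omega)]
      rfl
    · exact pvFoldA_zero boxes num_prisoners max_attempts (by omega)
  obtain ⟨hP, hnd, hm⟩ := hpre.resolve_left htriv
  simp only [Spec_prisoner_algorithm_choice, prisoner_algorithm_choice,
    prisoner_algorithm_choice_alt, if_neg htriv]
  apply PySem.List.foldl_congr_mem
  intro acc p hp
  rw [PySem.List.mem_pyRange_one] at hp
  have hpS : pvS boxes p := ⟨hp.1, by omega⟩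
  obtain ⟨L, hL, hLn, hfix, hmin⟩ := pvMinPeriod hP hnd hpS
  have h2 : (pvBuildDict boxes).getD p 0 = (L : Int) := by
    rw [pvBuildDict_getD hP hnd hpS, pvCycleOf_eq hL hLn hfix hmin]
    simp
  have h1 : pvLoopA boxes p max_attempts.toNat p = true ↔ L ≤ max_attempts.toNat := by
    have hiter := pvLoopA_iff (boxes := boxes) p max_attempts.toNat 0
    rw [show pvIter boxes 0 p = p from rfl] at hiter
    rw [hiter]
    constructor
    · rintro ⟨k, hk1, hk2, hk3⟩
      have hLk : L ≤ k := by
        by_contra hcon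
        push_neg at hcon
        exact hmin k hk1 hcon (by simpa using hk3)
      omega
    · intro h
      exact ⟨L, hL, h, by simpa using hfix⟩
  by_cases hc : L ≤ max_attempts.toNat
  · rw [if_pos (h1.mpr hc), h2, if_pos (by omega : (L : Int) ≤ max_attempts)]
  · rw [if_neg (fun hh => hc (h1.mp hh)), h2,
      if_neg (by omega : ¬ (L : Int) ≤ max_attempts)]
    simp
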